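-- pv_equiv track=rewrite | github.com/bestrauc/advent-of-code-2023 | src/day3.py | neighboring_intervals
-- ===== SOURCE A (Python) =====
-- def neighboring_intervals(i: int, j: int, number_intervals: dict[list]) -> set[int]:
--     """Check the neighborhood of (i, j) for part numbers."""
--
--     neighbors = set()
--     for di in [-1, 0, +1]:
--         for dj in [-1, 0, +1]:
--             if (di == 0) and (dj == 0):
--                 continue
--
--             # Handle out of bounds or lines without any part numbers with .get
--             line_intervals = number_intervals.get(i+di, [])
--             matching = matching_interval(j+dj, line_intervals)
--
--             if matching is not None:
--                 neighbors.add(matching)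
--
--     return neighbors
--
-- def matching_interval(j: int, line_intervals: list) -> int | None:
--     for (int_s, int_e), number in line_intervals:
--         if int_s <= j < int_e:
--             return number
--
--     return None
-- ===== SOURCE B (Python) =====
-- def neighboring_intervals(i: int, j: int, number_intervals: dict) -> set:
--     """Check the neighborhood of (i, j) for part numbers.
--
--     Single pass per neighboring row: one dict lookup and one scan of the
--     row's intervals collects the first match for each of j-1, j, j+1."""
--     neighbors = set()
--     for di in (-1, 0, 1):
--         line_intervals = number_intervals.get(i + di, [])
--         left = mid = right = None
--         for (int_s, int_e), number in line_intervals: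
--             if left is None and int_s <= j - 1 < int_e:
--                 left = number
--             if mid is None and int_s <= j < int_e:
--                 mid = number
--             if right is None and int_s <= j + 1 < int_e:
--                 right = number
--         candidates = (left, right) if di == 0 else (left, mid, right)
--         for m in candidates:
--             if m is not None:
--                 neighbors.add(m)
--     return neighbors
-- ===== Notes on version B (the rewrite author's own statement) =====
-- stated objective: alternative
-- what changed: Per neighboring row, one dict lookup and a single scan of the row's intervals collects the first match for each of j-1, j, j+1, replacing A's 8 dict lookups each followed by its own linear interval scan.
import Mathlib
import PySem

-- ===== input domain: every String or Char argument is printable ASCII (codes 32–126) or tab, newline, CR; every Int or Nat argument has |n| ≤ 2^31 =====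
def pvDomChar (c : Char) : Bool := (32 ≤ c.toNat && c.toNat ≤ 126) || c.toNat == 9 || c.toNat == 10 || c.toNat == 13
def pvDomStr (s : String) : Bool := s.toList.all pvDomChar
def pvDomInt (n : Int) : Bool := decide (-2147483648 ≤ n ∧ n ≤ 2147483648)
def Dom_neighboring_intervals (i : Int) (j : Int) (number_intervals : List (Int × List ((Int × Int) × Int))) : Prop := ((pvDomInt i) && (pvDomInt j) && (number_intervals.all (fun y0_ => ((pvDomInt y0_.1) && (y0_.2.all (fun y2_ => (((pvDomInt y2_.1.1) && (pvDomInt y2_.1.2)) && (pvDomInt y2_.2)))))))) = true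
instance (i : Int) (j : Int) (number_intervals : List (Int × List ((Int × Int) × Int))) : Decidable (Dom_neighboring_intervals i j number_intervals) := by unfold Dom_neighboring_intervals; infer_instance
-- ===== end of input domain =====

-- B replaces A's 8 dict lookups + 8 first-match scans by, per neighboring row, one
-- lookup and one scan collecting the first match for each of j-1, j, j+1 (alternative).

-- ===== PORT A =====
def matchingInterval (j : Int) (line : List ((Int × Int) × Int)) : Option Int :=
  match line with
  | [] => none
  | ((s, e), n) :: rest => if s ≤ j ∧ j < e then some n else matchingInterval j rest

def neighboring_intervals (i : Int) (j : Int) (number_intervals : List (Int × List ((Int × Int) × Int))) : List Int :=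
  [(-1 : Int), 0, 1].foldl (fun acc di =>
    [(-1 : Int), 0, 1].foldl (fun acc dj =>
      if di = 0 ∧ dj = 0 then acc
      else
        match matchingInterval (j + dj) (PySem.Dict.getD (PySem.Dict.mk number_intervals) (i + di) []) with
        | some n => PySem.Set.add acc n
        | none => acc) acc) PySem.Set.empty

-- ===== PORT B =====
-- one pass over a row's intervals, keeping the first match for each of j-1, j, j+1
def firstMatches (j : Int) (line : List ((Int × Int) × Int)) : Option Int × Option Int × Option Int :=
  line.foldl (fun m e =>
    (if m.1 = none ∧ e.1.1 ≤ j - 1 ∧ j - 1 < e.1.2 then some e.2 else m.1,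
     if m.2.1 = none ∧ e.1.1 ≤ j ∧ j < e.1.2 then some e.2 else m.2.1,
     if m.2.2 = none ∧ e.1.1 ≤ j + 1 ∧ j + 1 < e.1.2 then some e.2 else m.2.2))
    (none, none, none)

def addIfSome (s : PySem.Set Int) (o : Option Int) : PySem.Set Int :=
  match o with
  | some n => PySem.Set.add s n
  | none => s

def neighboring_intervals_alt (i : Int) (j : Int) (number_intervals : List (Int × List ((Int × Int) × Int))) : List Int :=
  [(-1 : Int), 0, 1].foldl (fun acc di =>
    let m := firstMatches j (PySem.Dict.getD (PySem.Dict.mk number_intervals) (i + di) [])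
    (if di = 0 then [m.1, m.2.2] else [m.1, m.2.1, m.2.2]).foldl addIfSome acc)
    PySem.Set.empty

-- ===== PRECONDITION & SPEC =====
def Spec_neighboring_intervals (i : Int) (j : Int) (number_intervals : List (Int × List ((Int × Int) × Int))) (out : List Int) : Prop := out = neighboring_intervals_alt i j number_intervals
instance (i : Int) (j : Int) (number_intervals : List (Int × List ((Int × Int) × Int))) (out : List Int) : Decidable (Spec_neighboring_intervals i j number_intervals out) := by unfold Spec_neighboring_intervals; infer_instance

-- ===== CLAIM (what is proved, stated in full; the proofs are below) =====
def Claim_equal_neighboring_intervals : Prop := ∀ (i : Int) (j : Int) (number_intervals : List (Int × List ((Int × Int) × Int))), Dom_neighboring_intervals i j number_intervals → Spec_neighboring_intervals i j number_intervals (neighboring_intervals i j number_intervals)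

-- ===== LEMMAS AND PROOFS =====

def orO (a b : Option Int) : Option Int := if a = none then b else a

theorem firstMatches_go (j : Int) (line : List ((Int × Int) × Int))
    (acc : Option Int × Option Int × Option Int) :
    line.foldl (fun m e =>
      (if m.1 = none ∧ e.1.1 ≤ j - 1 ∧ j - 1 < e.1.2 then some e.2 else m.1,
       if m.2.1 = none ∧ e.1.1 ≤ j ∧ j < e.1.2 then some e.2 else m.2.1,
       if m.2.2 = none ∧ e.1.1 ≤ j + 1 ∧ j + 1 < e.1.2 then some e.2 else m.2.2)) acc
    = (orO acc.1 (matchingInterval (j - 1) line),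
       orO acc.2.1 (matchingInterval j line),
       orO acc.2.2 (matchingInterval (j + 1) line)) := by
  induction line generalizing acc with
  | nil =>
    obtain ⟨a, b, c⟩ := acc
    simp [matchingInterval, orO]
  | cons hd tl ih =>
    obtain ⟨⟨s, e⟩, n⟩ := hd
    simp only [List.foldl_cons, ih, matchingInterval]
    refine Prod.ext ?_ (Prod.ext ?_ ?_) <;> simp only
    · rcases acc.1 with _ | x <;> simp [orO] <;> split_ifs <;> simp_all [orO] <;> omega
    · rcases acc.2.1 with _ | x <;> simp [orO] <;> split_ifs <;> simp_all [orO] <;> omega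
    · rcases acc.2.2 with _ | x <;> simp [orO] <;> split_ifs <;> simp_all [orO] <;> omega

theorem firstMatches_eq (j : Int) (line : List ((Int × Int) × Int)) :
    firstMatches j line
    = (matchingInterval (j - 1) line, matchingInterval j line, matchingInterval (j + 1) line) := by
  unfold firstMatches
  rw [firstMatches_go]
  rfl

-- ===== VERDICT (by name: the statement is the Claim_ definition above) =====
theorem neighboring_intervals_spec : Claim_equal_neighboring_intervals := by
  intro i j nis _
  unfold Spec_neighboring_intervals neighboring_intervals neighboring_intervals_alt
  simp only [List.foldl_cons, List.foldl_nil, firstMatches_eq, add_zero,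
    sub_eq_add_neg]
  rfl
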